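-- pv_equiv track=rewrite | github.com/jorgeumberto/scanner | plugins/dirbust.py | _heuristic_severity
-- ===== SOURCE A (Python) =====
-- from typing import Dict, Any, List, Tuple
--
-- def _heuristic_severity(entries: List[Tuple[str,int,int]]) -> str:
--     """
--     Regras simples:
--       - Se houver 200/204 em caminhos sensíveis (admin, backup, .git, .env, config, upload), 'high'
--       - Se houver 200/204, 'medium'
--       - Se só 301/302/403, 'low'
--       - Vazio -> 'info'
--     """
--     if not entries:
--         return "info"
--     sensitive_tokens = ["admin", "backup", ".git", ".svn", ".env", "config", "db", "upload", "private", "secret"]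
--     any_ok = False
--     any_sensitive = False
--     only_redirect_or_forbidden = True
--
--     for path, code, _ in entries:
--         if code in (200, 201, 202, 204):
--             any_ok = True
--             only_redirect_or_forbidden = False
--             if any(tok in path.lower() for tok in sensitive_tokens):
--                 any_sensitive = True
--         elif code in (301, 302, 307, 308, 401, 403):
--             # continua como only_redirect_or_forbidden
--             pass
--         else:
--             # outros códigos (e.g. 500, 405) contam como não-only_redirect_or_forbidden
--             only_redirect_or_forbidden = False
--
--     if any_sensitive:
--         return "high"
--     if any_ok:
--         return "medium"
--     if only_redirect_or_forbidden:
--         return "low"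
--     return "info"
-- ===== SOURCE B (Python) =====
-- _SENSITIVE = ("admin", "backup", ".git", ".svn", ".env", "config", "db", "upload", "private", "secret")
-- _OK = {200, 201, 202, 204}
-- _RF = {301, 302, 307, 308, 401, 403}
--
--
-- def _heuristic_severity(entries):
--     if not entries:
--         return "info"
--     if any(c in _OK and any(t in p.lower() for t in _SENSITIVE) for p, c, _ in entries):
--         return "high"
--     if any(c in _OK for _, c, _ in entries):
--         return "medium"
--     if all(c in _RF for _, c, _ in entries):
--         return "low"
--     return "info"
-- ===== Notes on version B (the rewrite author's own statement) =====
-- stated objective: simpler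
-- what changed: Replaces the single flag-accumulating loop (three mutable booleans updated in branch order) by three independent declarative scans: any OK+sensitive, any OK, all redirect/forbidden, tried in severity order.
import Mathlib
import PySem

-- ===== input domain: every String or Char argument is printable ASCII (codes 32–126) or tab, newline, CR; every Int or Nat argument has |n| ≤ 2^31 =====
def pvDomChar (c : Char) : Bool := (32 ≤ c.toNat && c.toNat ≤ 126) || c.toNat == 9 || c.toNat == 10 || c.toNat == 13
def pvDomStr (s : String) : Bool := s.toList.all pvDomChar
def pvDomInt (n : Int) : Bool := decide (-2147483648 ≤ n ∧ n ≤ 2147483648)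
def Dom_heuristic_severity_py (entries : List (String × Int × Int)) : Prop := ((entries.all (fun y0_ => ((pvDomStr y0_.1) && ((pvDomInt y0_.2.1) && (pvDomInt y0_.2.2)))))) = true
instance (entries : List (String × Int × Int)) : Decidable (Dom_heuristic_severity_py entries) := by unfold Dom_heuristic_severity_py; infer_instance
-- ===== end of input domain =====

-- B replaces A's single flag-accumulating loop by three independent declarative scans (any OK+sensitive / any OK / all redirect-or-forbidden); objective: simpler.


-- ===== PORT A =====
def pySensitiveTokens : List String :=
  ["admin", "backup", ".git", ".svn", ".env", "config", "db", "upload", "private", "secret"]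

-- the loop body: updates (any_ok, any_sensitive, only_redirect_or_forbidden) exactly as A does
def pyStep (s : Bool × Bool × Bool) (e : String × Int × Int) : Bool × Bool × Bool :=
  if [(200 : Int), 201, 202, 204].contains e.2.1 then
    (true,
     s.2.1 || pySensitiveTokens.any (fun tok => PySem.Str.isIn tok (PySem.Str.lower e.1)),
     false)
  else if [(301 : Int), 302, 307, 308, 401, 403].contains e.2.1 then
    s
  else
    (s.1, s.2.1, false)

def heuristic_severity_py (entries : List (String × Int × Int)) : String :=
  if entries.isEmpty then "info"
  else
    let st := entries.foldl pyStep (false, false, true)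
    if st.2.1 then "high"
    else if st.1 then "medium"
    else if st.2.2 then "low"
    else "info"

-- ===== PORT B =====
def okCode (c : Int) : Bool := [(200 : Int), 201, 202, 204].contains c
def rfCode (c : Int) : Bool := [(301 : Int), 302, 307, 308, 401, 403].contains c
def sensitivePath (p : String) : Bool :=
  pySensitiveTokens.any (fun tok => PySem.Str.isIn tok (PySem.Str.lower p))

def heuristic_severity_py_alt (entries : List (String × Int × Int)) : String :=
  if entries.isEmpty then "info"
  else if entries.any (fun e => okCode e.2.1 && sensitivePath e.1) then "high"
  else if entries.any (fun e => okCode e.2.1) then "medium"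
  else if entries.all (fun e => rfCode e.2.1) then "low"
  else "info"

-- ===== PRECONDITION & SPEC =====
def Spec_heuristic_severity_py (entries : List (String × Int × Int)) (out : String) : Prop := out = heuristic_severity_py_alt entries
instance (entries : List (String × Int × Int)) (out : String) : Decidable (Spec_heuristic_severity_py entries out) := by unfold Spec_heuristic_severity_py; infer_instance

-- ===== CLAIM (what is proved, stated in full; the proofs are below) =====
def Claim_equal_heuristic_severity_py : Prop := ∀ (entries : List (String × Int × Int)), Dom_heuristic_severity_py entries → Spec_heuristic_severity_py entries (heuristic_severity_py entries)

-- ===== LEMMAS AND PROOFS =====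

-- characterisation of A's loop state after processing `entries` from state (a, s, r)
theorem foldl_pyStep_char (entries : List (String × Int × Int)) (a s r : Bool) :
    entries.foldl pyStep (a, s, r) =
      (a || entries.any (fun e => okCode e.2.1),
       s || entries.any (fun e => okCode e.2.1 && sensitivePath e.1),
       r && entries.all (fun e => rfCode e.2.1)) := by
  induction entries generalizing a s r with
  | nil => simp
  | cons e rest ih =>
    simp only [List.foldl_cons, List.any_cons, List.all_cons]
    by_cases hok : [(200 : Int), 201, 202, 204].contains e.2.1
    · have hok' : okCode e.2.1 = true := by simpa [okCode] using hok
      have hrf' : rfCode e.2.1 = false := by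
        simp [okCode] at hok
        rcases hok with h | h | h | h <;> simp [rfCode, h]
      rw [show pyStep (a, s, r) e = (true, s || sensitivePath e.1, false) by
        simp only [pyStep]; split_ifs with h1 h2 <;>
          simp_all [sensitivePath, PySem.Str.isIn]]
      rw [ih]
      simp [hok', hrf', Bool.or_assoc]
    · have hok' : okCode e.2.1 = false := by simpa [okCode] using hok
      by_cases hrf : [(301 : Int), 302, 307, 308, 401, 403].contains e.2.1
      · have hrf' : rfCode e.2.1 = true := by simpa [rfCode] using hrf
        rw [show pyStep (a, s, r) e = (a, s, r) by
          simp only [pyStep]; split_ifs with h1 h2 <;> simp_all]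
        rw [ih]
        simp [hok', hrf']
      · have hrf' : rfCode e.2.1 = false := by simpa [rfCode] using hrf
        rw [show pyStep (a, s, r) e = (a, s, false) by
          simp only [pyStep]; split_ifs with h1 h2 <;> simp_all]
        rw [ih]
        simp [hok', hrf']

-- ===== VERDICT (by name: the statement is the Claim_ definition above) =====
theorem heuristic_severity_py_spec : Claim_equal_heuristic_severity_py := by
  intro entries _
  unfold Spec_heuristic_severity_py heuristic_severity_py heuristic_severity_py_alt
  by_cases h : entries.isEmpty
  · simp [h]
  · simp only [h, if_false, Bool.false_eq_true]
    rw [foldl_pyStep_char]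
    simp only [Bool.false_or, Bool.true_and]
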